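-- pv_equiv track=rewrite | github.com/LeSaRDe/socialsim | cp4/doc_sim_comp.py | cp4_ven_doc_clustering_print_docs_by_labels
-- ===== SOURCE A (Python) =====
-- def cp4_ven_doc_clustering_print_docs_by_labels(labels, id_to_doc):
--     label_list = dict()
--     for i, k in enumerate(labels):
--         if k not in label_list.keys():
--             label_list[k] = [id_to_doc[i]]
--         else:
--             label_list[k].append(id_to_doc[i])
--     return label_list
-- ===== SOURCE B (Python) =====
-- def cp4_ven_doc_clustering_print_docs_by_labels(labels, id_to_doc):
--     return {k: [id_to_doc[i] for i in range(len(labels)) if labels[i] == k]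
--             for k in dict.fromkeys(labels)}
-- ===== Notes on version B (the rewrite author's own statement) =====
-- stated objective: alternative
-- what changed: B replaces A's single appending pass that mutates a dict of lists with a dict comprehension: compute the distinct labels once (dict.fromkeys) and, for each distinct label, rescan all indices collecting the matching documents.
import Mathlib
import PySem

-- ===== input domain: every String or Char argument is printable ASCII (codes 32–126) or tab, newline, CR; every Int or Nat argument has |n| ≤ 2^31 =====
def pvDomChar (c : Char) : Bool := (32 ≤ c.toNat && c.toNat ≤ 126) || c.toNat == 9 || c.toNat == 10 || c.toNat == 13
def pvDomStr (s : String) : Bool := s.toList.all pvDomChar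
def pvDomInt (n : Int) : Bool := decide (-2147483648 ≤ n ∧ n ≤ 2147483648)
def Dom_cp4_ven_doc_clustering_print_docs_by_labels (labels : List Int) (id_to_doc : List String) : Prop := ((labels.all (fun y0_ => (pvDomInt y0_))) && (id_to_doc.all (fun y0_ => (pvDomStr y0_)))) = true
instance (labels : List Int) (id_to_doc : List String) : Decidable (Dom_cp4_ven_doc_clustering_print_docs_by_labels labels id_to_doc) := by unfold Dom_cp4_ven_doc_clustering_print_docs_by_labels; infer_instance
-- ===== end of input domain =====

-- B groups documents by computing the distinct labels first and rescanning all indices per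
-- distinct label (alternative traversal); equivalence of the RETURN value is proved on inputs
-- where A does not raise IndexError.

-- ===== PORT A =====
def cp4_ven_doc_clustering_print_docs_by_labels (labels : List Int) (id_to_doc : List String) : List (Int × List String) :=
  ((PySem.List.enumerate labels).foldl
      (fun (d : PySem.Dict Int (List String)) (p : Int × Int) =>
        if d.contains p.2 = false then
          d.insert p.2 [PySem.List.pyGetD id_to_doc p.1 ""]
        else
          d.modify p.2 [] (fun v => v ++ [PySem.List.pyGetD id_to_doc p.1 ""]))
      PySem.Dict.empty).items

-- ===== PORT B =====
def cp4_ven_doc_clustering_print_docs_by_labels_alt (labels : List Int) (id_to_doc : List String) : List (Int × List String) :=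
  ((PySem.List.dedup labels).foldl
      (fun (d : PySem.Dict Int (List String)) (k : Int) =>
        d.insert k ((PySem.List.pyRange 0 (PySem.List.len labels)).filterMap
          (fun i => if PySem.List.pyGetD labels i 0 == k then some (PySem.List.pyGetD id_to_doc i "") else none)))
      PySem.Dict.empty).items

-- ===== PRECONDITION & SPEC =====
-- Pre_ excludes exactly the inputs with more labels than documents, on which A (and B) raise IndexError.
def Pre_cp4_ven_doc_clustering_print_docs_by_labels (labels : List Int) (id_to_doc : List String) : Prop :=
  labels.length ≤ id_to_doc.length
instance (labels : List Int) (id_to_doc : List String) : Decidable (Pre_cp4_ven_doc_clustering_print_docs_by_labels labels id_to_doc) := by unfold Pre_cp4_ven_doc_clustering_print_docs_by_labels; infer_instance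
def pvWitness_cp4_ven_doc_clustering_print_docs_by_labels : List Int × List String := ([1, 2, 1], ["a", "b", "c"])

def Spec_cp4_ven_doc_clustering_print_docs_by_labels (labels : List Int) (id_to_doc : List String) (out : List (Int × List String)) : Prop := out = cp4_ven_doc_clustering_print_docs_by_labels_alt labels id_to_doc
instance (labels : List Int) (id_to_doc : List String) (out : List (Int × List String)) : Decidable (Spec_cp4_ven_doc_clustering_print_docs_by_labels labels id_to_doc out) := by unfold Spec_cp4_ven_doc_clustering_print_docs_by_labels; infer_instance

-- ===== CLAIM (what is proved, stated in full; the proofs are below) =====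
def Claim_equal_cp4_ven_doc_clustering_print_docs_by_labels : Prop := ∀ (labels : List Int) (id_to_doc : List String), Dom_cp4_ven_doc_clustering_print_docs_by_labels labels id_to_doc → Pre_cp4_ven_doc_clustering_print_docs_by_labels labels id_to_doc → Spec_cp4_ven_doc_clustering_print_docs_by_labels labels id_to_doc (cp4_ven_doc_clustering_print_docs_by_labels labels id_to_doc)

-- ===== LEMMAS AND PROOFS =====

-- A's if/else step is exactly Dict.modify with default [].
lemma stepA_eq_modify (d : PySem.Dict Int (List String)) (k : Int) (x : String) :
    (if d.contains k = false then d.insert k [x] else d.modify k [] (fun v => v ++ [x]))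
      = d.modify k [] (fun v => v ++ [x]) := by
  by_cases h : d.contains k = false
  · simp only [h]
    unfold PySem.Dict.modify
    rw [PySem.Dict.getD_of_not_contains d [] h]
    simp
  · simp [h]

lemma map_filter_map_eq_filterMap {α β γ : Type} [BEq β] (xs : List α)
    (keyf : α → β) (vf : α → γ) (k : β) :
    List.map (fun p => p.2) (List.filter (fun p => p.1 == k) (xs.map (fun a => (keyf a, vf a))))
      = xs.filterMap (fun a => if keyf a == k then some (vf a) else none) := by
  induction xs with
  | nil => simp
  | cons a t ih =>
      simp only [List.map_cons, List.filter_cons, List.filterMap_cons]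
      cases h : keyf a == k <;> simp [*]

theorem cp4_spec_aux (labels : List Int) (id_to_doc : List String) :
    cp4_ven_doc_clustering_print_docs_by_labels labels id_to_doc
      = cp4_ven_doc_clustering_print_docs_by_labels_alt labels id_to_doc := by
  unfold cp4_ven_doc_clustering_print_docs_by_labels cp4_ven_doc_clustering_print_docs_by_labels_alt
  have hstep : (fun (d : PySem.Dict Int (List String)) (p : Int × Int) =>
      if d.contains p.2 = false then d.insert p.2 [PySem.List.pyGetD id_to_doc p.1 ""]
      else d.modify p.2 [] (fun v => v ++ [PySem.List.pyGetD id_to_doc p.1 ""]))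
      = fun d p => d.modify p.2 [] (fun v => v ++ [PySem.List.pyGetD id_to_doc p.1 ""]) := by
    funext d p
    exact stepA_eq_modify d p.2 _
  rw [hstep]
  have hfold : (PySem.List.enumerate labels).foldl
        (fun (d : PySem.Dict Int (List String)) (p : Int × Int) =>
          d.modify p.2 [] (fun v => v ++ [PySem.List.pyGetD id_to_doc p.1 ""])) PySem.Dict.empty
      = ((PySem.List.enumerate labels).map
          (fun p => (p.2, PySem.List.pyGetD id_to_doc p.1 ""))).foldl
          (fun d q => d.modify q.1 [] (fun v => v ++ [q.2])) PySem.Dict.empty := by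
    rw [List.foldl_map]
  rw [hfold]
  set L := (PySem.List.enumerate labels).map
      (fun p => (p.2, PySem.List.pyGetD id_to_doc p.1 "")) with hL
  set D := L.foldl (fun (d : PySem.Dict Int (List String)) q =>
      d.modify q.1 [] (fun v => v ++ [q.2])) PySem.Dict.empty with hD
  -- keys of the fold
  have hmapfst : L.map (fun q => q.1) = labels := by
    rw [hL, List.map_map]
    simp only [Function.comp_def]
    exact PySem.List.map_snd_enumerate labels 0
  have hkeys : D.keys = PySem.List.dedup labels := by
    have h := PySem.Dict.keys_foldl_modify_key L (fun q => q.1) []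
      (fun _ q v => v ++ [q.2]) PySem.Dict.empty
    rw [hD]
    rw [h, hmapfst, PySem.List.dedup_eq_ofList]
    rfl
  have hnodup : D.keys.Nodup := by
    rw [hD]
    exact PySem.Dict.nodup_keys_foldl_modify_key L (fun q => q.1) []
      (fun _ q v => v ++ [q.2]) PySem.Dict.empty (by simp)
  rw [PySem.Dict.items_eq_map_keys D hnodup [], hkeys]
  -- B side: a fold inserting fresh distinct keys appends its items
  have hfreshB : ∀ a ∈ PySem.List.dedup labels,
      (PySem.Dict.empty : PySem.Dict Int (List String)).contains ((fun k => k) a) = false := by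
    intro a _; exact PySem.Dict.contains_empty a
  have hnodupmap : (List.map (fun k => k) (PySem.List.dedup labels)).Nodup := by
    simp only [List.map_id_fun', id]
    exact PySem.List.nodup_dedup labels
  have hBitems : ((PySem.List.dedup labels).foldl
        (fun (d : PySem.Dict Int (List String)) k =>
          d.insert k ((PySem.List.pyRange 0 (PySem.List.len labels)).filterMap
            (fun i => if PySem.List.pyGetD labels i 0 == k then
              some (PySem.List.pyGetD id_to_doc i "") else none))) PySem.Dict.empty).items
      = (PySem.List.dedup labels).map (fun k =>
          (k, (PySem.List.pyRange 0 (PySem.List.len labels)).filterMap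
            (fun i => if PySem.List.pyGetD labels i 0 == k then
              some (PySem.List.pyGetD id_to_doc i "") else none))) := by
    simpa using PySem.Dict.items_foldl_insert_fresh (PySem.List.dedup labels) (fun k => k)
      (fun k => (PySem.List.pyRange 0 (PySem.List.len labels)).filterMap
        (fun i => if PySem.List.pyGetD labels i 0 == k then
          some (PySem.List.pyGetD id_to_doc i "") else none))
      PySem.Dict.empty hfreshB hnodupmap
  rw [hBitems]
  refine List.map_congr_left ?_
  intro k _
  refine congrArg (fun v => (k, v)) ?_
  have hg := PySem.Dict.getD_foldl_modify_append L PySem.Dict.empty k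
  rw [← hD] at hg
  simp only [PySem.Dict.getD_empty, List.nil_append] at hg
  rw [hg, hL, PySem.List.enumerate_eq_map_pyRange labels 0, List.map_map]
  simp only [Function.comp_def]
  exact map_filter_map_eq_filterMap _ (fun j => PySem.List.pyGetD labels j 0)
    (fun j => PySem.List.pyGetD id_to_doc j "") k

-- ===== VERDICT (by name: the statement is the Claim_ definition above) =====
theorem cp4_ven_doc_clustering_print_docs_by_labels_spec : Claim_equal_cp4_ven_doc_clustering_print_docs_by_labels := by
  intro labels id_to_doc _ _
  exact cp4_spec_aux labels id_to_doc
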